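-- pv_equiv track=rewrite | github.com/eric-s-s/dice-tables | dicetables/tools/orderedcombinations.py | get_combination_occurrences
-- ===== SOURCE A (Python) =====
-- from math import factorial
--
-- def get_combination_occurrences(combination, base_dict):
--     """simple calculation over tuple of sorted values and possibly repeating value
--     to tell number of unique permutations.  so get_count((1, 2, 3)) = 3!.
--     get_count((1, 2, 2, 3, 3)) = 5!/(2!*2!)"""
--     answer = factorial(len(combination))
--     current = combination[0]
--     multiplier = base_dict[current]
--     count = 0
--     for el in combination:
--         if el != current:
--             count = 0
--             multiplier = base_dict[el]
--             current = el
--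
--         count += 1
--         answer //= count
--         answer *= multiplier
--
--     return answer
-- ===== SOURCE B (Python) =====
-- from math import comb
--
-- def get_combination_occurrences(combination, base_dict):
--     if not combination:
--         return 1
--     value = combination[0]
--     run = 1
--     while run < len(combination) and combination[run] == value:
--         run += 1
--     return (comb(len(combination), run)
--             * base_dict[value] ** run
--             * get_combination_occurrences(combination[run:], base_dict))
-- ===== Notes on version B (the rewrite author's own statement) =====
-- stated objective: alternative
-- what changed: B is recursive and division-free: it peels the leading run of equal values and multiplies comb(len, run) * base_dict[value]**run into the recursive count of the tail, instead of A's iterative loop that starts from factorial(len) and interleaves an integer division and a multiplication at every element.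
import Mathlib
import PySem

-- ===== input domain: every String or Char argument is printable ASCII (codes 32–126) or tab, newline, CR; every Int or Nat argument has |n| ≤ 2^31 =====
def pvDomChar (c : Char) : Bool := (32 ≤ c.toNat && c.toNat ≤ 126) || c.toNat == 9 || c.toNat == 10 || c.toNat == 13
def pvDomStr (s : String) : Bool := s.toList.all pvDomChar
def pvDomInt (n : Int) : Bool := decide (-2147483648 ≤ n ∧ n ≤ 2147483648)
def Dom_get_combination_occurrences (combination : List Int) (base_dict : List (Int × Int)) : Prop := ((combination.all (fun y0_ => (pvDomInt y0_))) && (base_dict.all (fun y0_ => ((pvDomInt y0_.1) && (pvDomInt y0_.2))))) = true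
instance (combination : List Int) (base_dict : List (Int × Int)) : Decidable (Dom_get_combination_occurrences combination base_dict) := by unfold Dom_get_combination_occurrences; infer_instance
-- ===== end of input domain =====

-- B counts the permutations recursively and division-free: peel the leading run of equal values and
-- multiply comb(len, run) * base_dict[value]**run into the count of the tail; objective: alternative.

-- ===== PORT A =====
-- A-side helper: one iteration of A's loop body over the state (answer, current, multiplier, count)
def aStep (base_dict : List (Int × Int)) (st : Int × Int × Int × Int) (el : Int) : Int × Int × Int × Int :=
  let answer := st.1
  let current := st.2.1
  let multiplier := st.2.2.1
  let count := st.2.2.2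
  let (count, multiplier, current) :=
    if el ≠ current then (0, ((PySem.Dict.mk base_dict).get? el).getD 0, el)
    else (count, multiplier, current)
  let count := count + 1
  let answer := PySem.Int.floordiv answer count
  let answer := answer * multiplier
  (answer, current, multiplier, count)

def get_combination_occurrences (combination : List Int) (base_dict : List (Int × Int)) : Int :=
  let answer : Int := (Nat.factorial combination.length : Int)
  let current : Int := (PySem.List.pyGet? combination 0).getD 0
  let multiplier : Int := ((PySem.Dict.mk base_dict).get? current).getD 0
  (combination.foldl (aStep base_dict) (answer, current, multiplier, 0)).1

-- ===== PORT B =====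
-- B's while loop counts the leading run of elements equal to combination[0]; ported as the length of
-- the matching takeWhile prefix of the tail (+1 for the head), and the slice combination[run:] is the
-- corresponding dropWhile suffix; math.comb is ported as Nat.choose.
def get_combination_occurrences_alt (combination : List Int) (base_dict : List (Int × Int)) : Int :=
  match combination with
  | [] => 1
  | x :: xs =>
    let run := (xs.takeWhile (· == x)).length + 1
    (Nat.choose (xs.length + 1) run : Int)
      * ((PySem.Dict.mk base_dict).get? x).getD 0 ^ run
      * get_combination_occurrences_alt (xs.dropWhile (· == x)) base_dict
  termination_by combination.length
  decreasing_by
    have := List.length_dropWhile_le (· == x) xs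
    simp only [List.length_cons]
    omega

-- ===== PRECONDITION & SPEC =====
-- Pre_ excludes exactly the inputs where the Python A raises: the empty combination (IndexError on
-- combination[0]) and combinations containing a value missing from base_dict (KeyError).
def Pre_get_combination_occurrences (combination : List Int) (base_dict : List (Int × Int)) : Prop :=
  combination ≠ [] ∧ ∀ el ∈ combination, ((PySem.Dict.mk base_dict).get? el).isSome

instance (combination : List Int) (base_dict : List (Int × Int)) : Decidable (Pre_get_combination_occurrences combination base_dict) := by unfold Pre_get_combination_occurrences; infer_instance

def pvWitness_get_combination_occurrences : List Int × (List (Int × Int)) := ([1, 2, 2], [(1, 2), (2, 3)])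

def Spec_get_combination_occurrences (combination : List Int) (base_dict : List (Int × Int)) (out : Int) : Prop := out = get_combination_occurrences_alt combination base_dict
instance (combination : List Int) (base_dict : List (Int × Int)) (out : Int) : Decidable (Spec_get_combination_occurrences combination base_dict out) := by unfold Spec_get_combination_occurrences; infer_instance

-- ===== CLAIM (what is proved, stated in full; the proofs are below) =====
def Claim_equal_get_combination_occurrences : Prop := ∀ (combination : List Int) (base_dict : List (Int × Int)), Dom_get_combination_occurrences combination base_dict → Pre_get_combination_occurrences combination base_dict → Spec_get_combination_occurrences combination base_dict (get_combination_occurrences combination base_dict)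

-- ===== LEMMAS AND PROOFS =====

-- A's answer after an uninterrupted run: divide by count+1..count+j, multiplying by m each time.
def runVal (m : Int) : Int → Int → Nat → Int
  | a, _, 0 => a
  | a, cnt, j+1 => runVal m (PySem.Int.floordiv a (cnt + 1) * m) (cnt + 1) j

-- consecutive runs of a list (the groups B recurses on), seen front-to-back
def pyGroupby : List Int → List (Int × Nat)
  | [] => []
  | x :: xs =>
    match pyGroupby xs with
    | (v, c) :: gs => if x = v then (v, c + 1) :: gs else (x, 1) :: (v, c) :: gs
    | [] => [(x, 1)]

lemma pyGroupby_cons_run : ∀ (xs : List Int) (x : Int),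
    pyGroupby (x :: xs)
      = (x, (xs.takeWhile (· == x)).length + 1) :: pyGroupby (xs.dropWhile (· == x)) := by
  intro xs
  induction xs with
  | nil => intro x; rfl
  | cons y ys ih =>
    intro x
    by_cases hxy : y = x
    · subst hxy
      show (match pyGroupby (y :: ys) with
            | (v, c) :: gs => if y = v then (v, c + 1) :: gs else (y, 1) :: (v, c) :: gs
            | [] => [(y, 1)]) = _
      rw [ih y]
      simp
    · have hne : ¬ x = y := fun h => hxy h.symm
      show (match pyGroupby (y :: ys) with
            | (v, c) :: gs => if x = v then (v, c + 1) :: gs else (x, 1) :: (v, c) :: gs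
            | [] => [(x, 1)]) = _
      rw [ih y]
      simp only [if_neg hne]
      have ht : (y :: ys).takeWhile (· == x) = [] := by simp [hxy]
      have hd : (y :: ys).dropWhile (· == x) = y :: ys := by simp [hxy]
      rw [ht, hd, ih y]
      simp

-- A's fold over a run of elements all equal to the current value
lemma foldl_run (bd : List (Int × Int)) (t : List Int) : ∀ (v a m cnt : Int),
    (∀ y ∈ t, y = v) →
    List.foldl (aStep bd) (a, v, m, cnt) t = (runVal m a cnt t.length, v, m, cnt + t.length) := by
  induction t with
  | nil => intro v a m cnt _; simp [runVal]
  | cons y t ih =>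
    intro v a m cnt hall
    have hy : y = v := hall y (by simp)
    subst hy
    have hstep : aStep bd (a, y, m, cnt) y =
        (PySem.Int.floordiv a (cnt + 1) * m, y, m, cnt + 1) := by
      simp only [aStep, if_neg (fun h : y ≠ y => h rfl)]
    rw [List.foldl_cons, hstep, ih y _ m (cnt + 1) (fun z hz => hall z (List.mem_cons_of_mem _ hz))]
    have hc : cnt + 1 + (t.length : Int) = cnt + ((t.length : Int) + 1) := by ring
    simp only [runVal, List.length_cons, Nat.cast_add, Nat.cast_one, hc]

lemma head?_dropWhile_ne (xs : List Int) (x y : Int)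
    (h : (xs.dropWhile (· == x)).head? = some y) : y ≠ x := by
  induction xs with
  | nil => simp [List.dropWhile] at h
  | cons z zs ih =>
    by_cases hz : z = x
    · rw [List.dropWhile_cons] at h
      simp [hz] at h
      exact ih h
    · rw [List.dropWhile_cons] at h
      simp [hz] at h
      omega

-- A's whole fold, grouped by runs
lemma foldl_eq_groups (bd : List (Int × Int)) : ∀ (n : Nat) (l : List Int), l.length ≤ n →
    ∀ (a cur m cnt : Int),
    (∀ y, l.head? = some y →
      (y ≠ cur ∨ (cur = y ∧ m = ((PySem.Dict.mk bd).get? y).getD 0 ∧ cnt = 0))) →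
    (List.foldl (aStep bd) (a, cur, m, cnt) l).1
      = (pyGroupby l).foldl
          (fun a g => runVal (((PySem.Dict.mk bd).get? g.1).getD 0) a 0 g.2) a := by
  intro n
  induction n with
  | zero =>
    intro l hl a cur m cnt _
    have : l = [] := List.eq_nil_of_length_eq_zero (Nat.le_zero.mp hl)
    subst this
    rfl
  | succ n ih =>
    intro l hl a cur m cnt h
    cases l with
    | nil => rfl
    | cons x xs =>
      have hstep : aStep bd (a, cur, m, cnt) x
          = (PySem.Int.floordiv a 1 * ((PySem.Dict.mk bd).get? x).getD 0, x,
             ((PySem.Dict.mk bd).get? x).getD 0, 1) := by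
        rcases h x rfl with hne | ⟨hc, hm, hcnt⟩
        · simp only [aStep, if_pos hne, zero_add]
        · subst hc; subst hm; subst hcnt
          simp [aStep]
      have hsplit : xs = xs.takeWhile (· == x) ++ xs.dropWhile (· == x) :=
        (List.takeWhile_append_dropWhile).symm
      rw [List.foldl_cons, hstep]
      conv_lhs => rw [hsplit]
      rw [List.foldl_append]
      rw [foldl_run bd (xs.takeWhile (· == x)) x _ _ 1
          (fun z hz => by simpa using List.mem_takeWhile_imp hz)]
      have hlen : (xs.dropWhile (· == x)).length ≤ n := by
        have h1 := List.length_dropWhile_le (fun y => y == x) xs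
        simp only [List.length_cons] at hl
        omega
      rw [ih (xs.dropWhile (· == x)) hlen _ x _ _
          (fun y hy => Or.inl (head?_dropWhile_ne xs x y hy))]
      rw [pyGroupby_cons_run, List.foldl_cons]
      congr 1

-- ascending factorial: asc k c = (k+1)(k+2)⋯(k+c)
def asc : Nat → Nat → Nat
  | _, 0 => 1
  | k, c + 1 => (k + 1) * asc (k + 1) c

lemma asc_mul_factorial : ∀ (c k : Nat), asc k c * Nat.factorial k = Nat.factorial (k + c) := by
  intro c
  induction c with
  | zero => intro k; simp [asc]
  | succ c ih =>
    intro k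
    show (k + 1) * asc (k + 1) c * Nat.factorial k = Nat.factorial (k + (c + 1))
    calc (k + 1) * asc (k + 1) c * Nat.factorial k
        = asc (k + 1) c * ((k + 1) * Nat.factorial k) := by ring
      _ = asc (k + 1) c * Nat.factorial (k + 1) := by rw [Nat.factorial_succ]
      _ = Nat.factorial (k + 1 + c) := ih (k + 1)
      _ = Nat.factorial (k + (c + 1)) := by ring_nf

lemma asc_zero_left (c : Nat) : asc 0 c = Nat.factorial c := by
  have := asc_mul_factorial c 0
  simpa [Nat.factorial] using this

lemma asc_pos : ∀ (c k : Nat), 0 < asc k c := by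
  intro c
  induction c with
  | zero => intro k; simp [asc]
  | succ c ih => intro k; exact Nat.mul_pos (Nat.succ_pos k) (ih (k + 1))

-- exact evaluation of runVal under divisibility
lemma runVal_exact : ∀ (c k : Nat) (a m : Int), ((asc k c : Nat) : Int) ∣ a →
    runVal m a (k : Int) c = a / ((asc k c : Nat) : Int) * m ^ c := by
  intro c
  induction c with
  | zero => intro k a m _; simp [runVal, asc]
  | succ c ih =>
    intro k a m hdvd
    have hcast : ((asc k (c + 1) : Nat) : Int) = ((k : Int) + 1) * ((asc (k + 1) c : Nat) : Int) := by
      show (((k + 1) * asc (k + 1) c : Nat) : Int) = _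
      push_cast; ring
    rw [hcast] at hdvd
    obtain ⟨q, hq⟩ := hdvd
    have hk1 : (0 : Int) < (k : Int) + 1 := by positivity
    have hP : (0 : Int) < ((asc (k + 1) c : Nat) : Int) := by exact_mod_cast asc_pos c (k + 1)
    have hstep : runVal m a (k : Int) (c + 1)
        = runVal m (PySem.Int.floordiv a ((k : Int) + 1) * m) ((k : Int) + 1) c := rfl
    rw [hstep]
    rw [PySem.Int.floordiv_eq_ediv_of_pos hk1]
    have hdiv : a / ((k : Int) + 1) = ((asc (k + 1) c : Nat) : Int) * q := by
      rw [hq, mul_assoc, Int.mul_ediv_cancel_left _ (ne_of_gt hk1)]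
    rw [hdiv]
    have ha' : ((asc (k + 1) c : Nat) : Int) * q * m
        = ((asc (k + 1) c : Nat) : Int) * (q * m) := by ring
    rw [ha']
    have h2 : ((k : Int) + 1) = (((k + 1 : Nat) : Int)) := by push_cast; ring
    rw [h2]
    rw [ih (k + 1) _ m ⟨q * m, rfl⟩]
    rw [Int.mul_ediv_cancel_left _ (ne_of_gt hP)]
    rw [hcast, hq]
    rw [Int.mul_ediv_cancel_left _ (ne_of_gt (mul_pos hk1 hP))]
    ring

def prodFact (gs : List (Int × Nat)) : Nat := (gs.map (fun g => Nat.factorial g.2)).prod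


lemma prodFact_pos : ∀ (gs : List (Int × Nat)), 0 < prodFact gs := by
  intro gs
  induction gs with
  | nil => simp [prodFact]
  | cons g gs ih =>
    have h1 : prodFact (g :: gs) = Nat.factorial g.2 * prodFact gs := rfl
    rw [h1]
    exact Nat.mul_pos (Nat.factorial_pos _) ih

def prodMult (bd : List (Int × Int)) (gs : List (Int × Nat)) : Int :=
  (gs.map (fun g => (((PySem.Dict.mk bd).get? g.1).getD 0) ^ g.2)).prod

-- fold of runVal over groups, evaluated in closed form given divisibility in the accumulator
lemma groups_val (bd : List (Int × Int)) : ∀ (gs : List (Int × Nat)) (a : Int),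
    ((prodFact gs : Nat) : Int) ∣ a →
    gs.foldl (fun a g => runVal (((PySem.Dict.mk bd).get? g.1).getD 0) a 0 g.2) a
      = a / ((prodFact gs : Nat) : Int) * prodMult bd gs := by
  intro gs
  induction gs with
  | nil => intro a _; simp [prodFact, prodMult]
  | cons g gs ih =>
    intro a hdvd
    have hpf : ((prodFact (g :: gs) : Nat) : Int)
        = (Nat.factorial g.2 : Int) * ((prodFact gs : Nat) : Int) := by
      show ((Nat.factorial g.2 * prodFact gs : Nat) : Int) = _
      push_cast; ring
    rw [hpf] at hdvd
    obtain ⟨q, hq⟩ := hdvd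
    have hfpos : (0 : Int) < (Nat.factorial g.2 : Int) := by exact_mod_cast Nat.factorial_pos g.2
    have hPpos : (0 : Int) < ((prodFact gs : Nat) : Int) := by
      exact_mod_cast prodFact_pos gs
    set m := ((PySem.Dict.mk bd).get? g.1).getD 0 with hm
    have h0 : runVal m a 0 g.2 = a / (Nat.factorial g.2 : Int) * m ^ g.2 := by
      have h00 : ((0 : Nat) : Int) = (0 : Int) := rfl
      rw [← h00, runVal_exact g.2 0 a _
        (by rw [asc_zero_left]
            exact ⟨((prodFact gs : Nat) : Int) * q, by rw [hq]; ring⟩)]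
      rw [asc_zero_left]
    have hdiv : a / (Nat.factorial g.2 : Int) = ((prodFact gs : Nat) : Int) * q := by
      rw [hq, mul_assoc, Int.mul_ediv_cancel_left _ (ne_of_gt hfpos)]
    rw [List.foldl_cons, h0, hdiv]
    rw [ih _ ⟨q * m ^ g.2, by ring⟩]
    have hq2 : ((prodFact gs : Nat) : Int) * q * m ^ g.2
        = ((prodFact gs : Nat) : Int) * (q * m ^ g.2) := by ring
    rw [hq2, Int.mul_ediv_cancel_left _ (ne_of_gt hPpos)]
    have haq : a / ((Nat.factorial g.2 : Int) * ((prodFact gs : Nat) : Int)) = q := by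
      rw [hq, Int.mul_ediv_cancel_left _ (ne_of_gt (mul_pos hfpos hPpos))]
    rw [hpf, haq]
    have hpm : prodMult bd (g :: gs) = m ^ g.2 * prodMult bd gs := by
      simp [prodMult, hm]
    rw [hpm]
    ring

lemma pyGroupby_sum : ∀ (l : List Int), ((pyGroupby l).map (fun g => g.2)).sum = l.length := by
  intro l
  induction l with
  | nil => rfl
  | cons x xs ih =>
    have hx : ((pyGroupby (x :: xs)).map (fun g => g.2)).sum
        = 1 + ((pyGroupby xs).map (fun g => g.2)).sum := by
      cases hg : pyGroupby xs with
      | nil => simp [pyGroupby, hg]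
      | cons p gs =>
        obtain ⟨v, c⟩ := p
        simp only [pyGroupby, hg]
        by_cases hv : x = v
        · simp [hv]
          omega
        · simp [hv]
    rw [hx, ih]
    simp only [List.length_cons]
    omega

lemma prodFact_dvd : ∀ (gs : List (Int × Nat)),
    prodFact gs ∣ Nat.factorial ((gs.map (fun g => g.2)).sum) := by
  intro gs
  induction gs with
  | nil => simp [prodFact]
  | cons g gs ih =>
    have h1 : prodFact (g :: gs) = Nat.factorial g.2 * prodFact gs := rfl
    rw [h1]
    calc Nat.factorial g.2 * prodFact gs
        ∣ Nat.factorial g.2 * Nat.factorial ((gs.map (fun g => g.2)).sum) :=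
          Nat.mul_dvd_mul_left _ ih
      _ ∣ Nat.factorial (g.2 + (gs.map (fun g => g.2)).sum) :=
          Nat.factorial_mul_factorial_dvd_factorial_add _ _
      _ = Nat.factorial (((g :: gs).map (fun g => g.2)).sum) := by simp

-- B's recursion, cleared of division: alt l * ∏ run! = len(l)! * ∏ mult^run
lemma alt_mul_prodFact (bd : List (Int × Int)) : ∀ (n : Nat) (l : List Int), l.length ≤ n →
    get_combination_occurrences_alt l bd * ((prodFact (pyGroupby l) : Nat) : Int)
      = ((Nat.factorial l.length : Nat) : Int) * prodMult bd (pyGroupby l) := by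
  intro n
  induction n with
  | zero =>
    intro l hl
    have : l = [] := List.eq_nil_of_length_eq_zero (Nat.le_zero.mp hl)
    subst this
    simp [get_combination_occurrences_alt, pyGroupby, prodFact, prodMult]
  | succ n ih =>
    intro l hl
    cases l with
    | nil => simp [get_combination_occurrences_alt, pyGroupby, prodFact, prodMult]
    | cons x xs =>
      set r := (xs.takeWhile (· == x)).length + 1 with hr
      have hrle : r ≤ xs.length + 1 := by
        have := (List.takeWhile_sublist (l := xs) (p := (· == x))).length_le
        omega
      have hrest_len : (xs.dropWhile (· == x)).length = xs.length + 1 - r := by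
        have hsplit : xs = xs.takeWhile (· == x) ++ xs.dropWhile (· == x) :=
          (List.takeWhile_append_dropWhile).symm
        have hlen2 := congrArg List.length hsplit
        simp only [List.length_append] at hlen2
        omega
      have hlen : (xs.dropWhile (· == x)).length ≤ n := by
        have h1 := List.length_dropWhile_le (· == x) xs
        simp only [List.length_cons] at hl
        omega
      have halt : get_combination_occurrences_alt (x :: xs) bd
          = (Nat.choose (xs.length + 1) r : Int)
            * ((PySem.Dict.mk bd).get? x).getD 0 ^ r
            * get_combination_occurrences_alt (xs.dropWhile (· == x)) bd := by
        rw [get_combination_occurrences_alt]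
      have hg := pyGroupby_cons_run xs x
      rw [halt, hg]
      have hpf : ((prodFact ((x, r) :: pyGroupby (xs.dropWhile (· == x))) : Nat) : Int)
          = (Nat.factorial r : Int) * ((prodFact (pyGroupby (xs.dropWhile (· == x))) : Nat) : Int) := by
        show ((Nat.factorial r * prodFact (pyGroupby (xs.dropWhile (· == x))) : Nat) : Int) = _
        push_cast; ring
      have hpm : prodMult bd ((x, r) :: pyGroupby (xs.dropWhile (· == x)))
          = ((PySem.Dict.mk bd).get? x).getD 0 ^ r
            * prodMult bd (pyGroupby (xs.dropWhile (· == x))) := by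
        simp [prodMult]
      rw [hpf, hpm]
      have hih := ih (xs.dropWhile (· == x)) hlen
      have hchoose : Nat.choose (xs.length + 1) r * Nat.factorial r
            * Nat.factorial (xs.length + 1 - r) = Nat.factorial (xs.length + 1) :=
        Nat.choose_mul_factorial_mul_factorial hrle
      have hchooseZ : (Nat.choose (xs.length + 1) r : Int) * (Nat.factorial r : Int)
            * (Nat.factorial (xs.length + 1 - r) : Int) = (Nat.factorial (xs.length + 1) : Int) := by
        exact_mod_cast hchoose
      calc (Nat.choose (xs.length + 1) r : Int)
            * ((PySem.Dict.mk bd).get? x).getD 0 ^ r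
            * get_combination_occurrences_alt (xs.dropWhile (· == x)) bd
            * ((Nat.factorial r : Int) * ((prodFact (pyGroupby (xs.dropWhile (· == x))) : Nat) : Int))
          = (Nat.choose (xs.length + 1) r : Int) * (Nat.factorial r : Int)
            * ((PySem.Dict.mk bd).get? x).getD 0 ^ r
            * (get_combination_occurrences_alt (xs.dropWhile (· == x)) bd
               * ((prodFact (pyGroupby (xs.dropWhile (· == x))) : Nat) : Int)) := by ring
        _ = (Nat.choose (xs.length + 1) r : Int) * (Nat.factorial r : Int)
            * ((PySem.Dict.mk bd).get? x).getD 0 ^ r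
            * ((Nat.factorial (xs.dropWhile (· == x)).length : Int)
               * prodMult bd (pyGroupby (xs.dropWhile (· == x)))) := by rw [hih]
        _ = (Nat.choose (xs.length + 1) r : Int) * (Nat.factorial r : Int)
            * (Nat.factorial (xs.length + 1 - r) : Int)
            * (((PySem.Dict.mk bd).get? x).getD 0 ^ r
               * prodMult bd (pyGroupby (xs.dropWhile (· == x)))) := by rw [hrest_len]; ring
        _ = (Nat.factorial (xs.length + 1) : Int)
            * (((PySem.Dict.mk bd).get? x).getD 0 ^ r
               * prodMult bd (pyGroupby (xs.dropWhile (· == x)))) := by rw [hchooseZ]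
        _ = ((Nat.factorial (x :: xs).length : Nat) : Int)
            * (((PySem.Dict.mk bd).get? x).getD 0 ^ r
               * prodMult bd (pyGroupby (xs.dropWhile (· == x)))) := by
              simp

-- ===== VERDICT (by name: the statement is the Claim_ definition above) =====
theorem get_combination_occurrences_spec : Claim_equal_get_combination_occurrences := by
  intro combination base_dict _ hpre
  unfold Spec_get_combination_occurrences
  unfold get_combination_occurrences
  cases combination with
  | nil => exact absurd rfl hpre.1
  | cons x xs =>
    have hget : ((PySem.List.pyGet? (x :: xs) 0).getD 0) = x := by
      simp [PySem.List.pyGet?, PySem.List.pyIdx?]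
    rw [hget]
    rw [foldl_eq_groups base_dict (x :: xs).length (x :: xs) (Nat.le_refl _) _ x _ 0
        (fun y hy => Or.inr ⟨by cases hy; rfl, by cases hy; rfl, rfl⟩)]
    have hdvd : ((prodFact (pyGroupby (x :: xs)) : Nat) : Int)
        ∣ ((Nat.factorial (x :: xs).length : Nat) : Int) := by
      have := prodFact_dvd (pyGroupby (x :: xs))
      rw [pyGroupby_sum (x :: xs)] at this
      exact_mod_cast this
    rw [groups_val base_dict _ _ hdvd]
    obtain ⟨q, hq⟩ := hdvd
    have hPpos : (0 : Int) < ((prodFact (pyGroupby (x :: xs)) : Nat) : Int) := by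
      exact_mod_cast prodFact_pos (pyGroupby (x :: xs))
    have halt := alt_mul_prodFact base_dict (x :: xs).length (x :: xs) (Nat.le_refl _)
    have hdivq : ((Nat.factorial (x :: xs).length : Nat) : Int)
        / ((prodFact (pyGroupby (x :: xs)) : Nat) : Int) = q := by
      rw [hq, Int.mul_ediv_cancel_left _ (ne_of_gt hPpos)]
    rw [hdivq]
    apply mul_left_cancel₀ (ne_of_gt hPpos)
    calc ((prodFact (pyGroupby (x :: xs)) : Nat) : Int) * (q * prodMult base_dict (pyGroupby (x :: xs)))
        = ((Nat.factorial (x :: xs).length : Nat) : Int) * prodMult base_dict (pyGroupby (x :: xs)) := by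
          rw [hq]; ring
      _ = get_combination_occurrences_alt (x :: xs) base_dict
            * ((prodFact (pyGroupby (x :: xs)) : Nat) : Int) := halt.symm
      _ = ((prodFact (pyGroupby (x :: xs)) : Nat) : Int)
            * get_combination_occurrences_alt (x :: xs) base_dict := by ring
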